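-- pv_equiv track=rewrite | github.com/island255/cross-inlining_binary_function_similarity | 1.function_mapping_labeling/tree_sitter_scripts/use_tree_sitter_get_function_ranges.py | get_file_content_by_point
-- ===== SOURCE A (Python) =====
-- def get_file_content_by_point(file_content_by_lines, start_point, end_point):
--     content = []
--     start_line = start_point[0]
--     start_column = start_point[1]
--     end_line = end_point[0]
--     end_column = end_point[1]
--     for line in range(start_line, end_line + 1):
--         if line == start_line and line == end_line:
--             content.append(file_content_by_lines[line][start_column:end_column])
--         elif line == start_line:
--             content.append(file_content_by_lines[line][start_column:])
--         elif line == end_line: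
--             content.append(file_content_by_lines[line][:end_column])
--         else:
--             content.append(file_content_by_lines[line])
--     return "\n".join(content)
-- ===== SOURCE B (Python) =====
-- def get_file_content_by_point(file_content_by_lines, start_point, end_point):
--     (start_line, start_column), (end_line, end_column) = start_point, end_point
--     if end_line < start_line:
--         return ""
--     if start_line == end_line:
--         return file_content_by_lines[start_line][start_column:end_column]
--     parts = [file_content_by_lines[start_line][start_column:]]
--     parts.extend(file_content_by_lines[start_line + 1:end_line])
--     parts.append(file_content_by_lines[end_line][:end_column])
--     return "\n".join(parts)
-- ===== Notes on version B (the rewrite author's own statement) =====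
-- stated objective: simpler
-- what changed: Replaces the per-line loop with four branch tests inside it by a direct three-case decomposition: empty range, single-line string slice, or first-line tail + whole middle lines taken by one list slice + last-line head, joined once.
-- outside the precondition, e.g. on get_file_content_by_point(['a', ''], (-2, 0), (0, 1)): A returns 'a\n\na', B returns 'a\na'
import Mathlib
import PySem

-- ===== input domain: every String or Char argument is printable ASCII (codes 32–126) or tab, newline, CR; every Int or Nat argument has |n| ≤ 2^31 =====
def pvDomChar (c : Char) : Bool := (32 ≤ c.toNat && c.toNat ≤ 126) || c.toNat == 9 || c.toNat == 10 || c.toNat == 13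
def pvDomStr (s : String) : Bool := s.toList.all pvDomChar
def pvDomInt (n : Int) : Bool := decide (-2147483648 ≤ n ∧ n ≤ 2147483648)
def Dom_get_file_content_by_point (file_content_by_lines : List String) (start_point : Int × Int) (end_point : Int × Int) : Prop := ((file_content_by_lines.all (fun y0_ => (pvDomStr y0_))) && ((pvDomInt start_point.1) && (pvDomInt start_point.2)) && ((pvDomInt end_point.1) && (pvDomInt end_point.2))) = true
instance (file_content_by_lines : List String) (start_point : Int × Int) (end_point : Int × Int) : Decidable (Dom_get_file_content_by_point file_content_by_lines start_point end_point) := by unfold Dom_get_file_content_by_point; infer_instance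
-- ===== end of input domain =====

-- B replaces A's per-line loop (with its four in-loop branch tests) by a direct three-case
-- decomposition — empty range / single-line slice / first tail + middle list-slice + last head —
-- for simplicity; same cost.

-- ===== PORT A =====
def get_file_content_by_point (file_content_by_lines : List String) (start_point : Int × Int) (end_point : Int × Int) : String :=
  let start_line := start_point.1
  let start_column := start_point.2
  let end_line := end_point.1
  let end_column := end_point.2
  let content : List String :=
    (PySem.List.pyRange start_line (end_line + 1) 1).foldl (fun content line =>
      if line = start_line ∧ line = end_line then
        content ++ [PySem.Str.slice (PySem.List.pyGetD file_content_by_lines line "") (some start_column) (some end_column)]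
      else if line = start_line then
        content ++ [PySem.Str.slice (PySem.List.pyGetD file_content_by_lines line "") (some start_column) none]
      else if line = end_line then
        content ++ [PySem.Str.slice (PySem.List.pyGetD file_content_by_lines line "") none (some end_column)]
      else
        content ++ [PySem.List.pyGetD file_content_by_lines line ""]) []
  PySem.Str.join "\n" content

-- ===== PORT B =====
def get_file_content_by_point_alt (file_content_by_lines : List String) (start_point : Int × Int) (end_point : Int × Int) : String :=
  let start_line := start_point.1
  let start_column := start_point.2
  let end_line := end_point.1
  let end_column := end_point.2
  if end_line < start_line then ""
  else if start_line = end_line then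
    PySem.Str.slice (PySem.List.pyGetD file_content_by_lines start_line "") (some start_column) (some end_column)
  else
    let parts : List String :=
      [PySem.Str.slice (PySem.List.pyGetD file_content_by_lines start_line "") (some start_column) none]
      ++ PySem.List.slice file_content_by_lines (some (start_line + 1)) (some end_line)
      ++ [PySem.Str.slice (PySem.List.pyGetD file_content_by_lines end_line "") none (some end_column)]
    PySem.Str.join "\n" parts

-- ===== PRECONDITION & SPEC =====
-- Pre_ excludes line ranges reaching outside [0, len(file_content_by_lines)) when start_line ≤ end_line:
-- past the end A raises IndexError, and below 0 Python's negative-index wraparound makes each program's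
-- value an accident of its indexing pattern, a corner no caller (tree-sitter points are nonnegative) specifies.
def Pre_get_file_content_by_point (file_content_by_lines : List String) (start_point : Int × Int) (end_point : Int × Int) : Prop :=
  end_point.1 < start_point.1 ∨ (0 ≤ start_point.1 ∧ end_point.1 < (file_content_by_lines.length : Int))
instance (file_content_by_lines : List String) (start_point : Int × Int) (end_point : Int × Int) : Decidable (Pre_get_file_content_by_point file_content_by_lines start_point end_point) := by unfold Pre_get_file_content_by_point; infer_instance

def pvWitness_get_file_content_by_point : List String × (Int × Int) × (Int × Int) := (["ab", "cd", "ef"], (0, 1), (2, 1))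

def Spec_get_file_content_by_point (file_content_by_lines : List String) (start_point : Int × Int) (end_point : Int × Int) (out : String) : Prop := out = get_file_content_by_point_alt file_content_by_lines start_point end_point
instance (file_content_by_lines : List String) (start_point : Int × Int) (end_point : Int × Int) (out : String) : Decidable (Spec_get_file_content_by_point file_content_by_lines start_point end_point out) := by unfold Spec_get_file_content_by_point; infer_instance

-- ===== CLAIM (what is proved, stated in full; the proofs are below) =====
def Claim_equal_get_file_content_by_point : Prop := ∀ (file_content_by_lines : List String) (start_point : Int × Int) (end_point : Int × Int), Dom_get_file_content_by_point file_content_by_lines start_point end_point → Pre_get_file_content_by_point file_content_by_lines start_point end_point → Spec_get_file_content_by_point file_content_by_lines start_point end_point (get_file_content_by_point file_content_by_lines start_point end_point)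



-- ===== LEMMAS AND PROOFS =====

-- middle lines of the loop = the list slice B takes
lemma mid_map_eq_slice (L : List String) (a b : Int) (ha : 0 ≤ a) (hab : a ≤ b)
    (hb : b ≤ (L.length : Int)) :
    (PySem.List.pyRange a b 1).map (fun i => PySem.List.pyGetD L i "") =
      PySem.List.slice L (some a) (some b) := by
  rw [PySem.List.slice_toNat L ha (le_trans ha hab)]
  apply List.ext_getElem
  · simp only [List.length_map, PySem.List.length_pyRange_one, List.length_take,
      List.length_drop]
    omega
  · intro k h1 h2
    simp only [List.length_map, PySem.List.length_pyRange_one] at h1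
    simp only [List.getElem_map, PySem.List.getElem_pyRange_one]
    rw [List.getElem_take, List.getElem_drop,
      PySem.List.pyGetD_eq_getElem L "" (by omega) (by omega)]
    congr 1
    omega

-- ===== VERDICT (by name: the statement is the Claim_ definition above) =====
theorem get_file_content_by_point_spec : Claim_equal_get_file_content_by_point := by
  intro L sp ep _hdom hpre
  unfold Spec_get_file_content_by_point
  obtain ⟨sl, sc⟩ := sp
  obtain ⟨el, ec⟩ := ep
  replace hpre : el < sl ∨ (0 ≤ sl ∧ el < (L.length : Int)) := hpre
  simp only [get_file_content_by_point, get_file_content_by_point_alt]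
  rcases hpre with h | ⟨h0, hn⟩
  · -- empty range
    simp only [h, if_pos]
    rw [PySem.List.pyRange_one_eq_nil (by omega : el + 1 ≤ sl)]
    rfl
  · by_cases hlt : el < sl
    · simp only [hlt, if_pos]
      rw [PySem.List.pyRange_one_eq_nil (by omega : el + 1 ≤ sl)]
      rfl
    · rw [if_neg hlt]
      -- rewrite A's loop body to a pure map form
      rw [PySem.List.foldl_congr_mem _ _
        (fun (content : List String) (line : Int) => content ++
          [if line = sl ∧ line = el then
              PySem.Str.slice (PySem.List.pyGetD L line "") (some sc) (some ec)
            else if line = sl then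
              PySem.Str.slice (PySem.List.pyGetD L line "") (some sc) none
            else if line = el then
              PySem.Str.slice (PySem.List.pyGetD L line "") none (some ec)
            else PySem.List.pyGetD L line ""]) _
        (by intro acc x _; dsimp only; split_ifs <;> rfl)]
      rw [PySem.List.foldl_append_singleton_eq_map]
      by_cases heq : sl = el
      · subst heq
        rw [if_pos rfl]
        rw [PySem.List.pyRange_one_singleton]
        simp only [List.map_cons, List.map_nil, and_self, if_pos]
        simp [PySem.Str.join, PySem.Str.slice]
      · rw [if_neg heq]
        rw [PySem.List.pyRange_one_append sl el (el + 1) (by omega) (by omega)]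
        rw [PySem.List.pyRange_one_cons (by omega : sl < el)]
        have hsingle : PySem.List.pyRange el (el + 1) 1 = [el] :=
          PySem.List.pyRange_one_singleton el
        rw [hsingle]
        rw [List.map_append, List.map_cons, List.map_cons, List.map_nil]
        have hfirst : (if sl = sl ∧ sl = el then
              PySem.Str.slice (PySem.List.pyGetD L sl "") (some sc) (some ec)
            else if sl = sl then
              PySem.Str.slice (PySem.List.pyGetD L sl "") (some sc) none
            else if sl = el then
              PySem.Str.slice (PySem.List.pyGetD L sl "") none (some ec)
            else PySem.List.pyGetD L sl "") =
            PySem.Str.slice (PySem.List.pyGetD L sl "") (some sc) none := by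
          simp [heq]
        have hlast : (if el = sl ∧ el = el then
              PySem.Str.slice (PySem.List.pyGetD L el "") (some sc) (some ec)
            else if el = sl then
              PySem.Str.slice (PySem.List.pyGetD L el "") (some sc) none
            else if el = el then
              PySem.Str.slice (PySem.List.pyGetD L el "") none (some ec)
            else PySem.List.pyGetD L el "") =
            PySem.Str.slice (PySem.List.pyGetD L el "") none (some ec) := by
          simp [Ne.symm heq]
        rw [hfirst, hlast]
        have hmid : (PySem.List.pyRange (sl + 1) el 1).map (fun line =>
            if line = sl ∧ line = el then
              PySem.Str.slice (PySem.List.pyGetD L line "") (some sc) (some ec)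
            else if line = sl then
              PySem.Str.slice (PySem.List.pyGetD L line "") (some sc) none
            else if line = el then
              PySem.Str.slice (PySem.List.pyGetD L line "") none (some ec)
            else PySem.List.pyGetD L line "") =
            PySem.List.slice L (some (sl + 1)) (some el) := by
          rw [← mid_map_eq_slice L (sl + 1) el (by omega) (by omega) (by omega)]
          apply List.map_congr_left
          intro x hx
          rw [PySem.List.mem_pyRange_one] at hx
          have hx1 : x ≠ sl := by omega
          have hx2 : x ≠ el := by omega
          simp [hx1, hx2]
        rw [hmid]
        rfl
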